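-- pv_equiv track=rewrite | github.com/walidozich/advent-of-code | day 10/challenge10.py | bfs_solution
-- ===== SOURCE A (Python) =====
-- from collections import deque
--
-- def bfs_solution(pattern: str, buttons: list[list[int]]):
-- 	"""Return minimal button presses via BFS over light states."""
-- 	n_lights = len(pattern)
-- 	target = 0
-- 	for idx, ch in enumerate(pattern):
-- 		if ch == "#":
-- 			target |= 1 << idx
--
-- 	button_masks = []
-- 	for toggles in buttons:
-- 		mask = 0
-- 		for t in toggles:
-- 			mask |= 1 << t
-- 		button_masks.append(mask)
--
-- 	start = 0
-- 	if start == target: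
-- 		return 0
--
-- 	seen = {start: 0}
-- 	queue = deque([start])
-- 	while queue:
-- 		state = queue.popleft()
-- 		steps = seen[state]
-- 		for mask in button_masks:
-- 			next_state = state ^ mask
-- 			if next_state == target:
-- 				return steps + 1
-- 			if next_state not in seen:
-- 				seen[next_state] = steps + 1
-- 				queue.append(next_state)
--
-- 	raise ValueError("No solution found")
-- ===== SOURCE B (Python) =====
-- def bfs_solution(pattern: str, buttons: list[list[int]]):
-- 	"""Return minimal button presses by searching combinations of button masks by size."""
-- 	target = 0
-- 	for idx, ch in enumerate(pattern):
-- 		if ch == "#":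
-- 			target |= 1 << idx
--
-- 	button_masks = []
-- 	for toggles in buttons:
-- 		mask = 0
-- 		for t in toggles:
-- 			mask |= 1 << t
-- 		button_masks.append(mask)
--
-- 	if target == 0:
-- 		return 0
--
-- 	def combo_xors(items, d):
-- 		# XOR of every d-element combination of items, as a list
-- 		if d == 0:
-- 			return [0]
-- 		if len(items) < d:
-- 			return []
-- 		head, tail = items[0], items[1:]
-- 		return [head ^ x for x in combo_xors(tail, d - 1)] + combo_xors(tail, d)
--
-- 	for d in range(1, len(button_masks) + 1):
-- 		for x in combo_xors(button_masks, d):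
-- 			if x == target:
-- 				return d
--
-- 	raise ValueError("No solution found")
-- ===== Notes on version B (the rewrite author's own statement) =====
-- stated objective: alternative
-- what changed: Replaces the BFS over light states (queue + seen dict) by a search over subset sizes: for d = 1..#buttons it XORs every d-element combination of the button masks and returns the first size that hits the target, which equals the BFS depth because a shortest press sequence uses distinct buttons each once.
import Mathlib
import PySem

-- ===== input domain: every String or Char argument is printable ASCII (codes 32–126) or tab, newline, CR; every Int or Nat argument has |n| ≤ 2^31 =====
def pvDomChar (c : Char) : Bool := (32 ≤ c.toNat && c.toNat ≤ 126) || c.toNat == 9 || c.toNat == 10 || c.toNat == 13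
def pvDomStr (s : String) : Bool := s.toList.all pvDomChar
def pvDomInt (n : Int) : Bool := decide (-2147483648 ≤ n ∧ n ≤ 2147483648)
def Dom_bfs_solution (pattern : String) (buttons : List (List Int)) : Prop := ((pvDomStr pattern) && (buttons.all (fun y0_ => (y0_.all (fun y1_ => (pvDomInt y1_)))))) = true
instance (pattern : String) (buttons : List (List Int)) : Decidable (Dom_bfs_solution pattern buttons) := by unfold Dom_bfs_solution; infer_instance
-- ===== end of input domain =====

-- B replaces A's BFS over light states by a search over combination sizes of the button masks
-- (first size whose XOR hits the target); same return value on every input A returns on (Pre_).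

-- ===== PORT A =====
-- Light states are nonnegative Python ints (built from 0 by `|` of `1 << t`, t ≥ 0 under Pre_),
-- represented as Nat; `t.toNat` is exact there (Python raises ValueError on a negative shift).

-- the inner `for mask in button_masks:` loop; `.inl r` is the early `return steps + 1`
def pvInnerA (target state steps : Nat) :
    List Nat → List Nat → PySem.Dict Nat Nat → Sum Nat (List Nat × PySem.Dict Nat Nat)
  | [], queue, seen => .inr (queue, seen)
  | m :: ms, queue, seen =>
    let next_state := state ^^^ m
    if next_state = target then .inl (steps + 1)
    else if seen.contains next_state then pvInnerA target state steps ms queue seen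
    else pvInnerA target state steps ms (queue ++ [next_state]) (seen.insert next_state (steps + 1))

-- the `while queue:` loop; the fuel only makes the recursion structural (it exceeds the number
-- of iterations of any run, see `pvLoopA_correct`); an exhausted queue is Python's
-- `raise ValueError` (none), as is fuel exhaustion (unreachable)
def pvLoopA (target : Nat) (masks : List Nat) :
    Nat → List Nat → PySem.Dict Nat Nat → Option Nat
  | 0, _, _ => none
  | _ + 1, [], _ => none
  | fuel + 1, state :: rest, seen =>
    let steps := seen.getD state 0   -- Python `seen[state]`; the key is always present
    match pvInnerA target state steps masks rest seen with
    | .inl r => some r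
    | .inr (q', seen') => pvLoopA target masks fuel q' seen'

def bfs_solution (pattern : String) (buttons : List (List Int)) : Int :=
  let target : Nat := (PySem.List.enumerate pattern.toList 0).foldl
      (fun acc p => if p.2 = '#' then acc ||| (1 <<< p.1.toNat) else acc) 0
  let button_masks : List Nat := buttons.map (fun toggles =>
      toggles.foldl (fun mask t => mask ||| (1 <<< t.toNat)) 0)
  if (0 : Nat) = target then 0    -- `if start == target: return 0`
  else
    match pvLoopA target button_masks (2 ^ button_masks.length + 1) [0]
        (PySem.Dict.empty.insert 0 0) with
    | some r => (r : Int)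
    | none => -1                  -- Python: raise ValueError("No solution found"); outside Pre_

-- ===== PORT B =====
-- combo_xors(items, d): the XOR of every d-element combination of items, in order
def pvComboXors : List Nat → Nat → List Nat
  | _, 0 => [0]
  | items, d + 1 =>
    if items.length < d + 1 then []
    else match items with
      | [] => []                -- unreachable (the length guard already returned [])
      | h :: tl => (pvComboXors tl d).map (fun x => h ^^^ x) ++ pvComboXors tl (d + 1)
  termination_by items d => items.length + d
  decreasing_by all_goals (simp only [List.length_cons]; omega)

-- `for d in range(1, len+1): for x in combo_xors(...):` — d stays a Python int; d ≥ 1 in the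
-- range, so `d.toNat` is exact
def pvSearchB (target : Nat) (masks : List Nat) : List Int → Option Int
  | [] => none
  | d :: ds =>
    if (pvComboXors masks d.toNat).any (fun x => x == target) then some d
    else pvSearchB target masks ds

def bfs_solution_alt (pattern : String) (buttons : List (List Int)) : Int :=
  let target : Nat := (PySem.List.enumerate pattern.toList 0).foldl
      (fun acc p => if p.2 = '#' then acc ||| (1 <<< p.1.toNat) else acc) 0
  let button_masks : List Nat := buttons.map (fun toggles =>
      toggles.foldl (fun mask t => mask ||| (1 <<< t.toNat)) 0)
  if target = 0 then 0
  else
    match pvSearchB target button_masks (PySem.List.pyRange 1 (button_masks.length + 1) 1) with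
    | some d => d
    | none => -1                  -- Python: raise ValueError("No solution found"); outside Pre_

-- ===== PRECONDITION & SPEC =====
def pvTargetP (pattern : String) : Nat := (PySem.List.enumerate pattern.toList 0).foldl
    (fun acc p => if p.2 = '#' then acc ||| (1 <<< p.1.toNat) else acc) 0
def pvMasksP (buttons : List (List Int)) : List Nat := buttons.map (fun toggles =>
    toggles.foldl (fun mask t => mask ||| (1 <<< t.toNat)) 0)

-- Pre_ admits exactly the inputs on which Python A returns: every toggle nonnegative (a negative
-- toggle makes `1 << t` raise ValueError), and the target pattern is the XOR of some subset of
-- the button masks (otherwise the BFS exhausts the reachable states and raises ValueError).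
def Pre_bfs_solution (pattern : String) (buttons : List (List Int)) : Prop :=
  (∀ l ∈ buttons, ∀ t ∈ l, 0 ≤ t) ∧
  ∃ u ∈ (pvMasksP buttons).sublists, u.foldl (· ^^^ ·) 0 = pvTargetP pattern
instance (pattern : String) (buttons : List (List Int)) : Decidable (Pre_bfs_solution pattern buttons) := by
  unfold Pre_bfs_solution; infer_instance

def pvWitness_bfs_solution : String × List (List Int) := ("#.#", [[0], [2], [0, 1]])

def Spec_bfs_solution (pattern : String) (buttons : List (List Int)) (out : Int) : Prop := out = bfs_solution_alt pattern buttons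
instance (pattern : String) (buttons : List (List Int)) (out : Int) : Decidable (Spec_bfs_solution pattern buttons out) := by unfold Spec_bfs_solution; infer_instance

-- ===== CLAIM (what is proved, stated in full; the proofs are below) =====
def Claim_equal_bfs_solution : Prop := ∀ (pattern : String) (buttons : List (List Int)), Dom_bfs_solution pattern buttons → Pre_bfs_solution pattern buttons → Spec_bfs_solution pattern buttons (bfs_solution pattern buttons)

-- ===== LEMMAS AND PROOFS =====

-- XOR of a word (a list of masks), as both ports fold it
def pvXorl (w : List Nat) : Nat := w.foldl (· ^^^ ·) 0

lemma pvXorl_shift (w : List Nat) : ∀ a : Nat, w.foldl (· ^^^ ·) a = a ^^^ pvXorl w := by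
  induction w with
  | nil => intro a; simp [pvXorl]
  | cons m w ih =>
    intro a
    show List.foldl _ (a ^^^ m) w = _
    have hc : pvXorl (m :: w) = m ^^^ pvXorl w := by
      show List.foldl _ (0 ^^^ m) w = _
      rw [ih (0 ^^^ m)]; simp
    rw [ih (a ^^^ m), hc, Nat.xor_assoc]

lemma pvXorl_cons (m : Nat) (w : List Nat) : pvXorl (m :: w) = m ^^^ pvXorl w := by
  show List.foldl _ (0 ^^^ m) w = _
  rw [pvXorl_shift w (0 ^^^ m)]; simp

-- words over the mask list, reachability, and the BFS distance from 0
def pvHasWord (masks : List Nat) (n y : Nat) : Prop :=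
  ∃ w : List Nat, (∀ m ∈ w, m ∈ masks) ∧ w.length = n ∧ pvXorl w = y
def pvReach (masks : List Nat) (y : Nat) : Prop := ∃ n, pvHasWord masks n y
noncomputable def pvD (masks : List Nat) (y : Nat) : Nat := sInf {n | pvHasWord masks n y}

lemma pvD_le {masks : List Nat} {n y : Nat} (h : pvHasWord masks n y) : pvD masks y ≤ n :=
  Nat.sInf_le h

lemma pvHasWord_d {masks : List Nat} {y : Nat} (h : pvReach masks y) :
    pvHasWord masks (pvD masks y) y := Nat.sInf_mem h

lemma pvHasWord_zero_iff {masks : List Nat} {y : Nat} : pvHasWord masks 0 y ↔ y = 0 := by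
  constructor
  · rintro ⟨w, -, hl, hx⟩; rw [List.length_eq_zero_iff] at hl; subst hl
    simpa [pvXorl] using hx.symm
  · rintro rfl; exact ⟨[], by simp, rfl, rfl⟩

lemma pvReach_zero (masks : List Nat) : pvReach masks 0 := ⟨0, pvHasWord_zero_iff.2 rfl⟩

lemma pvD_zero (masks : List Nat) : pvD masks 0 = 0 :=
  Nat.le_zero.1 (pvD_le (pvHasWord_zero_iff.2 rfl))

lemma pvD_pos {masks : List Nat} {t : Nat} (hr : pvReach masks t) (ht : t ≠ 0) :
    1 ≤ pvD masks t := by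
  by_contra h
  exact ht (pvHasWord_zero_iff.1 (by simpa [Nat.lt_one_iff.1 (not_le.1 h)] using pvHasWord_d hr))

lemma pvHasWord_cons {masks : List Nat} {n y m : Nat} (hm : m ∈ masks)
    (h : pvHasWord masks n y) : pvHasWord masks (n + 1) (y ^^^ m) := by
  obtain ⟨w, hw, hl, hx⟩ := h
  refine ⟨m :: w, ?_, by simp [hl], by rw [pvXorl_cons, hx, Nat.xor_comm]⟩
  intro m' hm'
  rcases List.mem_cons.1 hm' with rfl | h
  · exact hm
  · exact hw _ h

lemma pvReach_xor {masks : List Nat} {y m : Nat} (hm : m ∈ masks) (h : pvReach masks y) :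
    pvReach masks (y ^^^ m) := by obtain ⟨n, hn⟩ := h; exact ⟨n + 1, pvHasWord_cons hm hn⟩

lemma pvD_xor_le {masks : List Nat} {y m : Nat} (hm : m ∈ masks) (h : pvReach masks y) :
    pvD masks (y ^^^ m) ≤ pvD masks y + 1 :=
  pvD_le (pvHasWord_cons hm (pvHasWord_d h))

-- a state at distance d ≥ 1 has a predecessor at distance d − 1 that is not t (for any t ≠ 0)
lemma pvD_decomp {masks : List Nat} {y t : Nat} (hr : pvReach masks y)
    (hd : 1 ≤ pvD masks y) (ht : t ≠ 0) :
    ∃ m ∈ masks, ∃ z, pvReach masks z ∧ z ≠ t ∧ pvD masks z = pvD masks y - 1 ∧ y = z ^^^ m := by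
  obtain ⟨w, hw, hl, hx⟩ := pvHasWord_d hr
  match w, hl with
  | [], hl => rw [← hl] at hd; simp at hd
  | [m], hl =>
    refine ⟨m, hw m (by simp), 0, pvReach_zero masks, Ne.symm ht, ?_, ?_⟩
    · rw [pvD_zero]; simp at hl; omega
    · rw [← hx]; simp [pvXorl]
  | m₁ :: m₂ :: w', hl =>
    have hm₁ : m₁ ∈ masks := hw m₁ (by simp)
    have hm₂ : m₂ ∈ masks := hw m₂ (by simp)
    set q : Nat := pvXorl w' with hq
    have hxw : y = m₁ ^^^ (m₂ ^^^ q) := by rw [← hx, pvXorl_cons, pvXorl_cons]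
    have hword : ∀ z : Nat, pvHasWord masks w'.length z → pvXorl w' = z → True := fun _ _ _ => trivial
    have hw' : ∀ m ∈ w', m ∈ masks := fun m hm => hw m (by simp [hm])
    -- the two one-step predecessors of y
    have h1 : pvHasWord masks (w'.length + 1) (m₂ ^^^ q) :=
      ⟨m₂ :: w', fun m hm => by rcases List.mem_cons.1 hm with rfl | h; exact hm₂; exact hw' m h,
        by simp, by rw [pvXorl_cons]⟩
    have h2 : pvHasWord masks (w'.length + 1) (m₁ ^^^ q) :=
      ⟨m₁ :: w', fun m hm => by rcases List.mem_cons.1 hm with rfl | h; exact hm₁; exact hw' m h,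
        by simp, by rw [pvXorl_cons]⟩
    have hlen : w'.length + 1 = pvD masks y - 1 := by simp at hl; omega
    have hdz : ∀ (m z : Nat), m ∈ masks → pvHasWord masks (pvD masks y - 1) z → y = z ^^^ m →
        pvD masks z = pvD masks y - 1 := by
      intro m z hm hz hyz
      have hle : pvD masks z ≤ pvD masks y - 1 := pvD_le hz
      have hge : pvD masks y ≤ pvD masks z + 1 := by
        rw [hyz]; exact pvD_xor_le hm ⟨_, hz⟩
      omega
    have hy1 : y = (m₂ ^^^ q) ^^^ m₁ := by rw [hxw, Nat.xor_comm m₁]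
    have hy2 : y = (m₁ ^^^ q) ^^^ m₂ := by
      rw [hxw, Nat.xor_assoc, Nat.xor_comm q m₂]
    rw [hlen] at h1 h2
    by_cases hzt : m₂ ^^^ q = t
    · -- the other predecessor is ≠ t unless m₁ = m₂, which contradicts minimality
      have hne : m₁ ^^^ q ≠ t := by
        intro h12
        have : m₁ = m₂ := by
          have := h12.trans hzt.symm
          have h := congrArg (· ^^^ q) this
          simpa [Nat.xor_assoc] using h
        subst this
        have hqy : q = y := by rw [hxw, ← Nat.xor_assoc]; simp
        have : pvD masks y ≤ w'.length := pvD_le (hqy ▸ ⟨w', hw', rfl, rfl⟩)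
        simp at hl; omega
      exact ⟨m₂, hm₂, m₁ ^^^ q, ⟨_, h2⟩, hne, hdz m₂ _ hm₂ h2 hy2, hy2⟩
    · exact ⟨m₁, hm₁, m₂ ^^^ q, ⟨_, h1⟩, hzt, hdz m₁ _ hm₁ h1 hy1, hy1⟩

-- any XOR-combination of a sublist can absorb one more mask without growing by more than 1
lemma pvToggle {l : List Nat} {u : List Nat} (hu : u.Sublist l) {m : Nat} (hm : m ∈ l) :
    ∃ u', u'.Sublist l ∧ pvXorl u' = pvXorl u ^^^ m ∧ u'.length ≤ u.length + 1 := by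
  induction l generalizing u with
  | nil => simp at hm
  | cons a l' ih =>
    rcases List.sublist_cons_iff.1 hu with hu' | ⟨r, rfl, hr⟩
    · rcases List.mem_cons.1 hm with rfl | hm'
      · exact ⟨m :: u, (List.cons_sublist_cons).2 hu', by rw [pvXorl_cons, Nat.xor_comm], by simp⟩
      · obtain ⟨u', h1, h2, h3⟩ := ih hu' hm'
        exact ⟨u', h1.trans (List.sublist_cons_self a l'), h2, h3⟩
    · rcases List.mem_cons.1 hm with rfl | hm'
      · refine ⟨r, hr.trans (List.sublist_cons_self m l'), ?_,
          by simp only [List.length_cons]; omega⟩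
        rw [pvXorl_cons, Nat.xor_comm m, Nat.xor_assoc]; simp
      · obtain ⟨r', h1, h2, h3⟩ := ih hr hm'
        refine ⟨a :: r', List.cons_sublist_cons.2 h1, ?_, by simpa using h3⟩
        rw [pvXorl_cons, pvXorl_cons, h2, Nat.xor_assoc]

-- every word reduces to a sublist of the mask list with the same XOR and no greater length
lemma pvWord_to_sublist {masks : List Nat} :
    ∀ w : List Nat, (∀ m ∈ w, m ∈ masks) →
      ∃ u, u.Sublist masks ∧ pvXorl u = pvXorl w ∧ u.length ≤ w.length := by
  intro w
  induction w with
  | nil => exact fun _ => ⟨[], List.nil_sublist _, rfl, le_refl _⟩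
  | cons m w' ih =>
    intro hw
    obtain ⟨u, h1, h2, h3⟩ := ih (fun m' hm' => hw m' (by simp [hm']))
    obtain ⟨u', g1, g2, g3⟩ := pvToggle h1 (hw m (by simp))
    refine ⟨u', g1, ?_, by simp; omega⟩
    rw [g2, h2, pvXorl_cons, Nat.xor_comm]

lemma pvSublist_to_word {masks : List Nat} {u : List Nat} (hu : u.Sublist masks) :
    pvHasWord masks u.length (pvXorl u) :=
  ⟨u, fun _ hm => hu.mem hm, rfl, rfl⟩

lemma pvReach_iff_sublist {masks : List Nat} {y : Nat} :
    pvReach masks y ↔ ∃ u, u.Sublist masks ∧ pvXorl u = y := by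
  constructor
  · rintro ⟨n, w, hw, -, hx⟩
    obtain ⟨u, hu, hxu, -⟩ := pvWord_to_sublist w hw
    exact ⟨u, hu, by rw [hxu, hx]⟩
  · rintro ⟨u, hu, hx⟩; exact ⟨u.length, hx ▸ pvSublist_to_word hu⟩

-- ===== the BFS invariant =====
structure PvInv (masks : List Nat) (t : Nat) (q : List Nat) (sn : PySem.Dict Nat Nat) : Prop where
  keys_eq : ∃ proc, sn.keys = proc ++ q ∧
    ∀ s ∈ proc, ∀ m ∈ masks, s ^^^ m ≠ t ∧ s ^^^ m ∈ sn.keys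
  nodup : sn.keys.Nodup
  props : ∀ s ∈ sn.keys, pvReach masks s ∧ s ≠ t ∧ sn.getD s 0 = pvD masks s
  sorted : (sn.keys.map (fun s => sn.getD s 0)).Pairwise (· ≤ ·)
  bounded : ∀ s ∈ sn.keys, ∀ f ∈ q.head?, sn.getD s 0 ≤ sn.getD f 0 + 1
  front : ∀ f ∈ q.head?, sn.getD f 0 + 1 ≤ pvD masks t
  complete : ∀ y, pvReach masks y → y ≠ t →
    (∀ s ∈ q, pvD masks y ≤ sn.getD s 0) → y ∈ sn.keys

lemma pvInv_keys_len {masks t q sn} (h : PvInv masks t q sn) :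
    sn.keys.length ≤ 2 ^ masks.length := by
  have hsub : sn.keys.toFinset ⊆ ((masks.sublists).map pvXorl).toFinset := by
    intro x hx
    rw [List.mem_toFinset] at *
    obtain ⟨hr, -, -⟩ := h.props x hx
    obtain ⟨u, hu, hxu⟩ := pvReach_iff_sublist.1 hr
    rw [List.mem_map]
    exact ⟨u, List.mem_sublists.2 hu, hxu⟩
  calc sn.keys.length = sn.keys.toFinset.card := (List.toFinset_card_of_nodup h.nodup).symm
    _ ≤ ((masks.sublists).map pvXorl).toFinset.card := Finset.card_le_card hsub
    _ ≤ ((masks.sublists).map pvXorl).length := List.toFinset_card_le _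
    _ = 2 ^ masks.length := by rw [List.length_map, List.length_sublists]

lemma pvInv_empty_queue {masks t sn} (h : PvInv masks t [] sn) (ht : t ≠ 0)
    (hr : pvReach masks t) : False := by
  obtain ⟨m, hm, z, hrz, hzt, hzd, hyz⟩ := pvD_decomp hr (pvD_pos hr ht) ht
  have hz : z ∈ sn.keys := h.complete z hrz hzt (by simp)
  obtain ⟨proc, hpk, hcl⟩ := h.keys_eq
  rw [List.append_nil] at hpk
  exact (hcl z (hpk ▸ hz) m hm).1 hyz.symm

-- the head of the queue carries the minimal label among queue entries
lemma pv_sorted_head {f : Nat → Nat} {K proc : List Nat} {s : Nat} {rest : List Nat}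
    (hK : K = proc ++ s :: rest) (hp : (K.map f).Pairwise (· ≤ ·)) :
    ∀ x ∈ rest, f s ≤ f x := by
  rw [hK, List.map_append, List.map_cons] at hp
  have h2 := (List.pairwise_append.1 hp).2.1
  rw [List.pairwise_cons] at h2
  intro x hx
  exact h2.1 _ (List.mem_map_of_mem hx)

lemma pvInnerA_spec (t state steps : Nat) :
    ∀ ms (q : List Nat) (sn : PySem.Dict Nat Nat),
    (match pvInnerA t state steps ms q sn with
     | .inl r => r = steps + 1 ∧ ∃ m ∈ ms, state ^^^ m = t
     | .inr (q', sn') => (∀ m ∈ ms, state ^^^ m ≠ t) ∧ ∃ δ,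
        q' = q ++ δ ∧ sn'.keys = sn.keys ++ δ ∧ δ.Nodup ∧
        (∀ x ∈ δ, x ∉ sn.keys ∧ x ≠ t ∧ ∃ m ∈ ms, x = state ^^^ m) ∧
        (∀ x ∈ δ, sn'.getD x 0 = steps + 1) ∧
        (∀ x ∈ sn.keys, sn'.getD x 0 = sn.getD x 0) ∧
        (∀ m ∈ ms, state ^^^ m ∈ sn'.keys)) := by
  intro ms
  induction ms with
  | nil =>
    intro q sn
    simp only [pvInnerA]
    exact ⟨by simp, [], by simp, by simp, by simp, by simp, by simp, by simp, by simp⟩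
  | cons m ms' ih =>
    intro q sn
    simp only [pvInnerA]
    split_ifs with h1 h2
    · exact ⟨rfl, m, by simp, h1⟩
    · -- already seen: recurse with the same queue and dict
      have hIH := ih q sn
      cases hrec : pvInnerA t state steps ms' q sn with
      | inl r =>
        rw [hrec] at hIH
        obtain ⟨hr1, m', hm', hm't⟩ := hIH
        exact ⟨hr1, m', by simp [hm'], hm't⟩
      | inr p =>
        obtain ⟨q', sn'⟩ := p
        rw [hrec] at hIH
        obtain ⟨hnot, δ, hq', hk', hδnd, hδ, hδlab, hpres, hnb⟩ := hIH
        refine ⟨?_, δ, hq', hk', hδnd, ?_, hδlab, hpres, ?_⟩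
        · intro m'' hm''
          rcases List.mem_cons.1 hm'' with rfl | hm''
          · exact h1
          · exact hnot m'' hm''
        · intro x hx
          obtain ⟨g1, g2, m'', hm'', g3⟩ := hδ x hx
          exact ⟨g1, g2, m'', by simp [hm''], g3⟩
        · intro m'' hm''
          rcases List.mem_cons.1 hm'' with rfl | hm''
          · rw [hk', List.mem_append]
            exact Or.inl ((PySem.Dict.contains_iff_mem_keys sn _).1 h2)
          · exact hnb m'' hm''
    · -- unseen: insert and append, then recurse
      have hc : sn.contains (state ^^^ m) = false := by
        simpa using h2
      have hmemK : state ^^^ m ∉ sn.keys := by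
        intro hmem
        rw [← PySem.Dict.contains_iff_mem_keys sn _] at hmem
        rw [hc] at hmem; exact Bool.false_ne_true hmem
      have hkeys2 : (sn.insert (state ^^^ m) (steps + 1)).keys = sn.keys ++ [state ^^^ m] :=
        PySem.Dict.keys_insert_of_not_contains sn _ hc
      have hIH := ih (q ++ [state ^^^ m]) (sn.insert (state ^^^ m) (steps + 1))
      cases hrec : pvInnerA t state steps ms' (q ++ [state ^^^ m])
          (sn.insert (state ^^^ m) (steps + 1)) with
      | inl r =>
        rw [hrec] at hIH
        obtain ⟨hr1, m', hm', hm't⟩ := hIH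
        exact ⟨hr1, m', by simp [hm'], hm't⟩
      | inr p =>
        obtain ⟨q', sn'⟩ := p
        rw [hrec] at hIH
        obtain ⟨hnot, δ, hq', hk', hδnd, hδ, hδlab, hpres, hnb⟩ := hIH
        refine ⟨?_, (state ^^^ m) :: δ, by rw [hq']; simp, by rw [hk', hkeys2]; simp, ?_, ?_, ?_, ?_, ?_⟩
        · intro m'' hm''
          rcases List.mem_cons.1 hm'' with rfl | hm''
          · exact h1
          · exact hnot m'' hm''
        · refine List.nodup_cons.2 ⟨?_, hδnd⟩
          intro hmem
          exact (hδ _ hmem).1 (by rw [hkeys2]; simp)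
        · intro x hx
          rcases List.mem_cons.1 hx with rfl | hx
          · exact ⟨hmemK, h1, m, List.mem_cons_self, rfl⟩
          · obtain ⟨g1, g2, m'', hm'', g3⟩ := hδ x hx
            refine ⟨fun hxm => g1 (by rw [hkeys2]; simp [hxm]), g2, m'', by simp [hm''], g3⟩
        · intro x hx
          rcases List.mem_cons.1 hx with rfl | hx
          · rw [hpres _ (by rw [hkeys2]; simp)]
            exact PySem.Dict.getD_insert_self _ _ _ _
          · exact hδlab x hx
        · intro x hx
          rw [hpres x (by rw [hkeys2]; simp [hx])]
          exact PySem.Dict.getD_insert_of_ne sn _ _ (fun he => hmemK (he ▸ hx))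
        · intro m'' hm''
          rcases List.mem_cons.1 hm'' with rfl | hm''
          · rw [hk', List.mem_append, hkeys2]
            exact Or.inl (by simp)
          · exact hnb m'' hm''

lemma pvInv_step {masks : List Nat} {t : Nat} (ht : t ≠ 0) (hr : pvReach masks t)
    {s : Nat} {rest : List Nat} {sn : PySem.Dict Nat Nat}
    (h : PvInv masks t (s :: rest) sn) :
    (match pvInnerA t s (sn.getD s 0) masks rest sn with
     | .inl r => r = pvD masks t
     | .inr (q', sn') => (∃ δ, q' = rest ++ δ ∧ sn'.keys = sn.keys ++ δ) ∧
        PvInv masks t q' sn') := by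
  obtain ⟨proc, hpk, hproc⟩ := h.keys_eq
  have hsK : s ∈ sn.keys := by rw [hpk]; simp
  obtain ⟨hrs, hst, hls⟩ := h.props s hsK
  have hrest_ge : ∀ x ∈ rest, sn.getD s 0 ≤ sn.getD x 0 := pv_sorted_head hpk h.sorted
  have hD := h.front s rfl
  have hstep := pvInnerA_spec t s (sn.getD s 0) masks rest sn
  cases hcase : pvInnerA t s (sn.getD s 0) masks rest sn with
  | inl r =>
    rw [hcase] at hstep
    obtain ⟨hr1, m, hm, hmt⟩ := hstep
    have h1 : pvD masks t ≤ pvD masks s + 1 := hmt ▸ pvD_xor_le hm hrs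
    omega
  | inr p =>
    obtain ⟨q', sn'⟩ := p
    rw [hcase] at hstep
    obtain ⟨hnot, δ, hq', hk', hδnd, hδ, hδlab, hpres, hnb⟩ := hstep
    refine ⟨⟨δ, hq', hk'⟩, ?_⟩
    have hKsub : ∀ x ∈ sn.keys, x ∈ sn'.keys := by
      intro x hx; rw [hk']; exact List.mem_append_left _ hx
    have hδsub : ∀ x ∈ δ, x ∈ sn'.keys := by
      intro x hx; rw [hk']; exact List.mem_append_right _ hx
    have hδd : ∀ x ∈ δ, pvReach masks x ∧ x ≠ t ∧ pvD masks x = sn.getD s 0 + 1 := by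
      intro x hx
      obtain ⟨hxK, hxt, m, hm, rfl⟩ := hδ x hx
      refine ⟨pvReach_xor hm hrs, hxt, ?_⟩
      have hle : pvD masks (s ^^^ m) ≤ pvD masks s + 1 := pvD_xor_le hm hrs
      by_contra hne
      have hlt : pvD masks (s ^^^ m) ≤ sn.getD s 0 := by rw [hls]; omega
      refine hxK (h.complete _ (pvReach_xor hm hrs) hxt ?_)
      intro s' hs'
      rcases List.mem_cons.1 hs' with rfl | hs'
      · exact hlt
      · exact hlt.trans (hrest_ge s' hs')
    have hub : ∀ x ∈ sn'.keys, sn'.getD x 0 ≤ sn.getD s 0 + 1 := by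
      intro x hx
      rw [hk', List.mem_append] at hx
      rcases hx with hx | hx
      · rw [hpres x hx]; exact h.bounded x hx s rfl
      · rw [hδlab x hx]
    have hprops' : ∀ x ∈ sn'.keys, pvReach masks x ∧ x ≠ t ∧ sn'.getD x 0 = pvD masks x := by
      intro x hx
      rw [hk', List.mem_append] at hx
      rcases hx with hx | hx
      · obtain ⟨g1, g2, g3⟩ := h.props x hx
        exact ⟨g1, g2, by rw [hpres x hx, g3]⟩
      · obtain ⟨g1, g2, g3⟩ := hδd x hx
        exact ⟨g1, g2, by rw [hδlab x hx, g3]⟩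
    have hkeq' : sn'.keys = (proc ++ [s]) ++ (rest ++ δ) := by
      rw [hk', hpk]; simp
    have hcl' : ∀ x ∈ proc ++ [s], ∀ m ∈ masks, x ^^^ m ≠ t ∧ x ^^^ m ∈ sn'.keys := by
      intro x hx m hm
      rcases List.mem_append.1 hx with hx | hx
      · obtain ⟨g1, g2⟩ := hproc x hx m hm
        exact ⟨g1, hKsub _ g2⟩
      · rw [List.mem_singleton] at hx; subst hx
        exact ⟨hnot m hm, hnb m hm⟩
    have hnodup' : sn'.keys.Nodup := by
      rw [hk', List.nodup_append]
      refine ⟨h.nodup, hδnd, ?_⟩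
      intro x hxK y hyδ hxy
      exact (hδ y hyδ).1 (hxy ▸ hxK)
    have hsorted' : (sn'.keys.map (fun x => sn'.getD x 0)).Pairwise (· ≤ ·) := by
      rw [hk', List.map_append, List.pairwise_append]
      refine ⟨?_, ?_, ?_⟩
      · rw [List.map_congr_left hpres]
        exact h.sorted
      · rw [List.map_congr_left hδlab, List.map_const']
        exact List.pairwise_replicate.2 (Or.inr (le_refl _))
      · intro a ha b hb
        obtain ⟨x, hx, rfl⟩ := List.mem_map.1 ha
        obtain ⟨yv, hy, rfl⟩ := List.mem_map.1 hb
        rw [hpres x hx, hδlab yv hy]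
        exact h.bounded x hx s rfl
    have hq'mem : ∀ x ∈ rest ++ δ, x ∈ sn'.keys := by
      intro x hx
      rcases List.mem_append.1 hx with hx | hx
      · exact hKsub x (by rw [hpk]; simp [hx])
      · exact hδsub x hx
    have hbounded' : ∀ x ∈ sn'.keys, ∀ f ∈ q'.head?, sn'.getD x 0 ≤ sn'.getD f 0 + 1 := by
      intro x hx fr hfr
      have hfrq : fr ∈ q' := List.mem_of_mem_head? hfr
      rw [hq'] at hfrq
      have hfge : sn.getD s 0 ≤ sn'.getD fr 0 := by
        rcases List.mem_append.1 hfrq with hf | hf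
        · rw [hpres fr (by rw [hpk]; simp [hf])]
          exact hrest_ge fr hf
        · rw [hδlab fr hf]; omega
      have := hub x hx
      omega
    have hcomplete' : ∀ k y, pvD masks y = k → pvReach masks y → y ≠ t →
        (∀ s' ∈ q', pvD masks y ≤ sn'.getD s' 0) → y ∈ sn'.keys := by
      intro k
      induction k using Nat.strong_induction_on with
      | _ k IH =>
        intro y hdy hry hyt hcond
        by_cases hyL : pvD masks y ≤ sn.getD s 0
        · refine hKsub y (h.complete y hry hyt ?_)
          intro s' hs'
          rcases List.mem_cons.1 hs' with rfl | hs'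
          · exact hyL
          · exact hyL.trans (hrest_ge s' hs')
        · have h1 : 1 ≤ pvD masks y := by omega
          obtain ⟨m, hm, z, hrz, hzt, hzd, hyz⟩ := pvD_decomp hry h1 ht
          have hz : z ∈ sn'.keys :=
            IH (pvD masks z) (by omega) z rfl hrz hzt
              (fun s' hs' => le_trans (by omega) (hcond s' hs'))
          rw [hkeq', List.mem_append] at hz
          rcases hz with hz | hz
          · rw [hyz]
            exact (hcl' z hz m hm).2
          · exfalso
            have hc2 := hcond z (by rw [hq']; exact hz)
            have hzl : sn'.getD z 0 = pvD masks z := (hprops' z (hq'mem z hz)).2.2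
            omega
    have hfront' : ∀ f ∈ q'.head?, sn'.getD f 0 + 1 ≤ pvD masks t := by
      intro fr hfr
      have hfrq : fr ∈ q' := List.mem_of_mem_head? hfr
      have hfrk : fr ∈ sn'.keys := by rw [hq'] at hfrq; exact hq'mem fr hfrq
      by_contra hcon
      have hub2 := hub fr hfrk
      have hfr_eq : sn'.getD fr 0 = pvD masks t := by omega
      obtain ⟨qt, hqt⟩ : ∃ qt, q' = fr :: qt := by
        cases q' with
        | nil => simp at hfr
        | cons a qt =>
          obtain rfl : a = fr := by simpa using hfr
          exact ⟨qt, rfl⟩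
      have hq'ge : ∀ x ∈ q', pvD masks t ≤ sn'.getD x 0 := by
        have hkfr : sn'.keys = (proc ++ [s]) ++ fr :: qt := by rw [hkeq', ← hq', hqt]
        have hsh := pv_sorted_head hkfr hsorted'
        intro x hx
        rw [hqt] at hx
        rcases List.mem_cons.1 hx with rfl | hx
        · omega
        · rw [← hfr_eq]; exact hsh x hx
      obtain ⟨m₀, hm₀, x, hrx, hxt, hxd, htx⟩ := pvD_decomp hr (pvD_pos hr ht) ht
      have hxk : x ∈ sn'.keys := hcomplete' (pvD masks x) x rfl hrx hxt
        (fun s' hs' => by have := hq'ge s' hs'; omega)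
      rw [hkeq', List.mem_append] at hxk
      rcases hxk with hxk | hxk
      · exact (hcl' x hxk m₀ hm₀).1 htx.symm
      · have h2 := hq'ge x (by rw [hq']; exact hxk)
        have h3 : sn'.getD x 0 = pvD masks x := (hprops' x (hq'mem x hxk)).2.2
        have hDpos := pvD_pos hr ht
        omega
    exact ⟨⟨proc ++ [s], by rw [hq']; exact hkeq', hcl'⟩, hnodup', hprops', hsorted',
      hbounded', hfront', fun y hry hyt hcond => hcomplete' _ y rfl hry hyt hcond⟩

lemma pvLoopA_correct {masks : List Nat} {t : Nat} (ht : t ≠ 0) (hr : pvReach masks t) :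
    ∀ fuel (q : List Nat) (sn : PySem.Dict Nat Nat), PvInv masks t q sn →
      (2 ^ masks.length - sn.keys.length) + q.length < fuel →
      pvLoopA t masks fuel q sn = some (pvD masks t) := by
  intro fuel
  induction fuel with
  | zero => intro q sn _ hfuel; omega
  | succ fuel ih =>
    intro q sn hinv hfuel
    match q with
    | [] => exact absurd hinv (fun hi => pvInv_empty_queue hi ht hr)
    | s :: rest =>
      rw [pvLoopA]
      have hstep := pvInv_step ht hr hinv
      cases hcase : pvInnerA t s (sn.getD s 0) masks rest sn with
      | inl r =>
        rw [hcase] at hstep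
        rw [hstep]
      | inr p =>
        obtain ⟨q', sn'⟩ := p
        rw [hcase] at hstep
        obtain ⟨⟨δ, hq', hk'⟩, hinv'⟩ := hstep
        refine ih q' sn' hinv' ?_
        have hlen' : sn'.keys.length = sn.keys.length + δ.length := by rw [hk']; simp
        have hq'len : q'.length = rest.length + δ.length := by rw [hq']; simp
        have hbound := pvInv_keys_len hinv'
        simp only [List.length_cons] at hfuel
        omega

lemma pvInv_init {masks : List Nat} {t : Nat} (ht : t ≠ 0) (hr : pvReach masks t) :
    PvInv masks t [0] (PySem.Dict.empty.insert 0 0) := by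
  have hkeys : (PySem.Dict.empty.insert 0 0 : PySem.Dict Nat Nat).keys = [0] := by
    rw [PySem.Dict.keys_insert_of_not_contains PySem.Dict.empty _ (PySem.Dict.contains_empty 0),
      PySem.Dict.keys_empty]
    rfl
  have hget : (PySem.Dict.empty.insert 0 0 : PySem.Dict Nat Nat).getD 0 0 = 0 :=
    PySem.Dict.getD_insert_self _ _ _ _
  refine ⟨⟨[], by simp [hkeys], by simp⟩, by simp [hkeys], ?_, ?_, ?_, ?_, ?_⟩
  · intro x hx
    rw [hkeys, List.mem_singleton] at hx
    subst hx
    exact ⟨pvReach_zero masks, Ne.symm ht, by rw [hget, pvD_zero]⟩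
  · rw [hkeys]; simp
  · intro x hx f hf
    rw [hkeys, List.mem_singleton] at hx
    subst hx
    rw [hget]
    omega
  · intro f hf
    obtain rfl : 0 = f := by simpa using hf
    rw [hget]
    exact pvD_pos hr ht
  · intro y hry hyt hcond
    have h0 := hcond 0 (by simp)
    rw [hget, Nat.le_zero] at h0
    have := pvHasWord_d hry
    rw [h0] at this
    rw [hkeys, List.mem_singleton]
    exact pvHasWord_zero_iff.1 this

lemma pvA_eval (pattern : String) (buttons : List (List Int))
    (hpre : Pre_bfs_solution pattern buttons) :
    bfs_solution pattern buttons =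
      if pvTargetP pattern = 0 then 0
      else ((pvD (pvMasksP buttons) (pvTargetP pattern) : Nat) : Int) := by
  have hrfl : bfs_solution pattern buttons =
      (if (0 : Nat) = pvTargetP pattern then 0 else
        match pvLoopA (pvTargetP pattern) (pvMasksP buttons)
            (2 ^ (pvMasksP buttons).length + 1) [0] (PySem.Dict.empty.insert 0 0) with
        | some r => (r : Int)
        | none => -1) := rfl
  rw [hrfl]
  obtain ⟨-, u, hu, hxu⟩ := hpre
  have hreach : pvReach (pvMasksP buttons) (pvTargetP pattern) :=
    pvReach_iff_sublist.2 ⟨u, List.mem_sublists.1 hu, hxu⟩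
  by_cases h0 : pvTargetP pattern = 0
  · simp [h0]
  · rw [if_neg (fun he => h0 he.symm), if_neg h0]
    rw [pvLoopA_correct (masks := pvMasksP buttons) h0 hreach _ _ _ (pvInv_init h0 hreach) ?_]
    have hkeys : (PySem.Dict.empty.insert 0 0 : PySem.Dict Nat Nat).keys = [0] := by
      rw [PySem.Dict.keys_insert_of_not_contains PySem.Dict.empty _ (PySem.Dict.contains_empty 0),
        PySem.Dict.keys_empty]
      rfl
    rw [hkeys]
    have : 1 ≤ 2 ^ (pvMasksP buttons).length := Nat.one_le_two_pow
    simp only [List.length_singleton]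
    omega

-- ===== B-side =====
lemma pv_mem_comboXors :
    ∀ (items : List Nat) (d x : Nat),
      x ∈ pvComboXors items d ↔ ∃ u, u.Sublist items ∧ u.length = d ∧ pvXorl u = x := by
  intro items
  induction items with
  | nil =>
    intro d x
    cases d with
    | zero =>
      simp only [pvComboXors, List.mem_singleton]
      constructor
      · rintro rfl; exact ⟨[], List.nil_sublist _, rfl, rfl⟩
      · rintro ⟨u, hu, hl, hx⟩
        rw [List.sublist_nil] at hu; subst hu; exact hx.symm
    | succ d =>
      simp only [pvComboXors]
      constructor
      · intro h; simp at h
      · rintro ⟨u, hu, hl, -⟩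
        rw [List.sublist_nil] at hu; subst hu; simp at hl
  | cons h tl ih =>
    intro d x
    cases d with
    | zero =>
      simp only [pvComboXors, List.mem_singleton]
      constructor
      · rintro rfl; exact ⟨[], List.nil_sublist _, rfl, rfl⟩
      · rintro ⟨u, hu, hl, hx⟩
        rw [List.length_eq_zero_iff] at hl; subst hl; exact hx.symm
    | succ d =>
      rw [pvComboXors]
      split
      · rename_i hlt
        constructor
        · intro hx; simp at hx
        · rintro ⟨u, hu, hl, -⟩
          have := hu.length_le; omega
      · rename_i hge
        rw [List.mem_append, List.mem_map]
        constructor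
        · rintro (⟨y, hy, rfl⟩ | hx)
          · obtain ⟨u, hu, hl, hxu⟩ := (ih d y).1 hy
            exact ⟨h :: u, List.cons_sublist_cons.2 hu, by simp [hl],
              by rw [pvXorl_cons, hxu]⟩
          · obtain ⟨u, hu, hl, hxu⟩ := (ih (d + 1) x).1 hx
            exact ⟨u, hu.trans (List.sublist_cons_self h tl), hl, hxu⟩
        · rintro ⟨u, hu, hl, hxu⟩
          rcases List.sublist_cons_iff.1 hu with hu' | ⟨r, rfl, hr⟩
          · exact Or.inr ((ih (d + 1) x).2 ⟨u, hu', hl, hxu⟩)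
          · refine Or.inl ⟨pvXorl r, (ih d (pvXorl r)).2 ⟨r, hr, by simpa using hl, rfl⟩, ?_⟩
            rw [← hxu, pvXorl_cons]

lemma pvSearchB_eval {masks : List Nat} {t : Nat} {D : Nat}
    (hP : ∃ u, u.Sublist masks ∧ u.length = D ∧ pvXorl u = t)
    (hmin : ∀ e, (∃ u, u.Sublist masks ∧ u.length = e ∧ pvXorl u = t) → D ≤ e) :
    ∀ a b : Int, 0 < a → a ≤ (D : Int) → (D : Int) < b →
      pvSearchB t masks (PySem.List.pyRange a b 1) = some (D : Int) := by
  intro a b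
  induction hk : (b - a).toNat generalizing a with
  | zero => intro h0 hD hb; omega
  | succ k ihk =>
    intro h0 hD hb
    have hab : a < b := by omega
    rw [PySem.List.pyRange_one_cons hab]
    rw [pvSearchB]
    by_cases haD : a = (D : Int)
    · subst haD
      have : (pvComboXors masks ((D : Int)).toNat).any (fun x => x == t) = true := by
        rw [List.any_eq_true]
        refine ⟨t, ?_, by simp⟩
        rw [Int.toNat_natCast]
        exact (pv_mem_comboXors masks D t).2 hP
      rw [this]; simp
    · have hlt : a < (D : Int) := lt_of_le_of_ne hD haD
      have : (pvComboXors masks a.toNat).any (fun x => x == t) = false := by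
        rw [List.any_eq_false]
        intro x hx
        simp only [beq_iff_eq]
        intro hxt
        obtain ⟨u, hu, hl, hxu⟩ := (pv_mem_comboXors masks a.toNat x).1 hx
        have := hmin a.toNat ⟨u, hu, hl, by rw [hxu, hxt]⟩
        omega
      rw [this]
      simp only [Bool.false_eq_true, if_false]
      exact ihk (a + 1) (by omega) (by omega) (by omega) hb

lemma pvB_eval (pattern : String) (buttons : List (List Int))
    (hpre : Pre_bfs_solution pattern buttons) :
    bfs_solution_alt pattern buttons =
      if pvTargetP pattern = 0 then 0
      else ((pvD (pvMasksP buttons) (pvTargetP pattern) : Nat) : Int) := by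
  have hrfl : bfs_solution_alt pattern buttons =
      (if pvTargetP pattern = 0 then 0 else
        match pvSearchB (pvTargetP pattern) (pvMasksP buttons)
            (PySem.List.pyRange 1 (((pvMasksP buttons).length : Int) + 1) 1) with
        | some d => d
        | none => -1) := rfl
  rw [hrfl]
  obtain ⟨-, u, hu, hxu⟩ := hpre
  have hreach : pvReach (pvMasksP buttons) (pvTargetP pattern) :=
    pvReach_iff_sublist.2 ⟨u, List.mem_sublists.1 hu, hxu⟩
  by_cases h0 : pvTargetP pattern = 0
  · simp [h0]
  · rw [if_neg h0, if_neg h0]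
    set t := pvTargetP pattern with hT
    set ms := pvMasksP buttons with hM
    obtain ⟨w, hw, hlw, hxw⟩ := pvHasWord_d hreach
    obtain ⟨u₀, hu₀, hx₀, hl₀⟩ := pvWord_to_sublist w hw
    have hmin : ∀ e, (∃ v, v.Sublist ms ∧ v.length = e ∧ pvXorl v = t) → pvD ms t ≤ e := by
      rintro e ⟨v, hv, rfl, hx⟩
      exact pvD_le (hx ▸ pvSublist_to_word hv)
    have he : u₀.length = pvD ms t :=
      le_antisymm (by omega) (hmin u₀.length ⟨u₀, hu₀, rfl, hx₀.trans hxw⟩)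
    have hP : ∃ v, v.Sublist ms ∧ v.length = pvD ms t ∧ pvXorl v = t :=
      ⟨u₀, hu₀, he, hx₀.trans hxw⟩
    have hDlen : pvD ms t ≤ ms.length := he ▸ hu₀.length_le
    have h1 : 1 ≤ pvD ms t := pvD_pos hreach h0
    rw [pvSearchB_eval hP hmin 1 ((ms.length : Int) + 1) (by omega)
      (by exact_mod_cast h1) (by exact_mod_cast Nat.lt_succ_of_le hDlen)]

-- ===== VERDICT (by name: the statement is the Claim_ definition above) =====
theorem bfs_solution_spec : Claim_equal_bfs_solution := by
  intro pattern buttons _ hpre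
  unfold Spec_bfs_solution
  rw [pvA_eval pattern buttons hpre, pvB_eval pattern buttons hpre]
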